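-- pv_equiv track=rewrite | github.com/Xuzhiqian/autoGEMM | experiment/pipeline_optimization/micro_kernel_block_b_extra.py | micro_kernel_block_b_extra
-- ===== SOURCE A (Python) =====
-- def micro_kernel_block_b_extra(is_last_k,
--                                vector_id_array_B, VEC_REG_B_LEN,
--                                vector_scroll_B,
--                                register_scroll_B,
--                                B_odd_flag,
--                                LINES, COLS,
--                                REG_BLOCK_TRANS_FLAG):
--     code_str = ""
--     # Extra operations ensure that Load next block B works correctly
--     if REG_BLOCK_TRANS_FLAG and is_last_k and (not COLS == VEC_REG_B_LEN):
--         vector_scroll_B = [i for i in range(VEC_REG_B_LEN)]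
--         ptr_B_POS = 0
--         for j in range(VEC_REG_B_LEN):
--             code_str += f"    \"ldr     q{vector_id_array_B[vector_scroll_B[j]]}, [x{register_scroll_B[B_odd_flag]}, #{(ptr_B_POS)*16}]             \\n\"\n"
--             if ptr_B_POS == COLS - 1:
--                 ptr_B_POS = 0
--                 code_str += f"    \"add     x{register_scroll_B[B_odd_flag]}, x{register_scroll_B[B_odd_flag]}, x8              \\n\"\n"
--                 B_odd_flag ^= 1
--             else:
--                 ptr_B_POS += 1
--     return code_str
-- ===== SOURCE B (Python) =====
-- def micro_kernel_block_b_extra(is_last_k,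
--                                vector_id_array_B, VEC_REG_B_LEN,
--                                vector_scroll_B,
--                                register_scroll_B,
--                                B_odd_flag,
--                                LINES, COLS,
--                                REG_BLOCK_TRANS_FLAG):
--     # Stateless per-j computation: the offset, the register toggle and the
--     # position of the add line are closed-form functions of j.
--     if not (REG_BLOCK_TRANS_FLAG and is_last_k and COLS != VEC_REG_B_LEN):
--         return ""
--     parts = []
--     for j in range(VEC_REG_B_LEN):
--         if COLS > 0:
--             off = j % COLS
--             flag = B_odd_flag ^ ((j // COLS) % 2)
--         else:
--             off = j
--             flag = B_odd_flag
--         reg = register_scroll_B[flag]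
--         s = f"    \"ldr     q{vector_id_array_B[j]}, [x{reg}, #{off*16}]             \\n\"\n"
--         if COLS > 0 and off == COLS - 1:
--             s += f"    \"add     x{reg}, x{reg}, x8              \\n\"\n"
--         parts.append(s)
--     return "".join(parts)
-- ===== Notes on version B (the rewrite author's own statement) =====
-- stated objective: alternative
-- what changed: A threads a mutable pointer ptr_B_POS and a toggled B_odd_flag through the loop; B computes the offset (j % COLS), the register toggle (B_odd_flag ^ ((j // COLS) % 2)) and the position of the add line directly from j, building the per-iteration strings statelessly and joining them.
import Mathlib
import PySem

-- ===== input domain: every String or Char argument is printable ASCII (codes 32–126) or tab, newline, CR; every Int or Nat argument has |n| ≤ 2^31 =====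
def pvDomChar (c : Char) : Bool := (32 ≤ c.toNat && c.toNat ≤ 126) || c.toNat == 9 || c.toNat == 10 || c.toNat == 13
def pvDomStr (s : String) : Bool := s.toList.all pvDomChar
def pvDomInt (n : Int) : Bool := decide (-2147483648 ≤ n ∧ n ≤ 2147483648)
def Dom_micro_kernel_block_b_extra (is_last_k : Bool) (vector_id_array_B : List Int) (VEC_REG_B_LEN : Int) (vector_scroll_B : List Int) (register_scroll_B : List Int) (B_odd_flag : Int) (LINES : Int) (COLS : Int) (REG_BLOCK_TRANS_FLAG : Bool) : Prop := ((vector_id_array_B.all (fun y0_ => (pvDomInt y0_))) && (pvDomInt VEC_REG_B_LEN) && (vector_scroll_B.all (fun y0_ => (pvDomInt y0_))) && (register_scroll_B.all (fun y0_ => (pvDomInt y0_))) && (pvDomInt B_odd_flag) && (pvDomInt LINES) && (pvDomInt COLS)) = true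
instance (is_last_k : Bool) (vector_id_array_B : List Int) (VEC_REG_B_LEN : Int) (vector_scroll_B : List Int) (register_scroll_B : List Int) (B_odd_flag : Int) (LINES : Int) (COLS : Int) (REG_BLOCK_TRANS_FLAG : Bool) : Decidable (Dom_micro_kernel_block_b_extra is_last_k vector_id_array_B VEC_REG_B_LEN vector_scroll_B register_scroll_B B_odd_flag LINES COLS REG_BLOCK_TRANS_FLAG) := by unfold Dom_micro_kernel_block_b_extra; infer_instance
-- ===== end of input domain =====

-- B replaces A's stateful pointer/toggle accumulator by per-iteration closed-form index
-- arithmetic (objective: alternative decomposition, same cost); return values agree on Pre_.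

-- Python's `n ^ 1` (flip the low bit; exact for every int, positive or negative);
-- shared by both ports and by Pre_.
def pvXor1 (n : Int) : Int := if PySem.Int.mod n 2 = 0 then n + 1 else n - 1

-- ===== PORT A =====
-- the for-loop of A, state = (code_str, ptr_B_POS, B_odd_flag)
def pvALoop (vector_id_array_B vector_scroll_B register_scroll_B : List Int) (COLS : Int) :
    List Int → String × Int × Int → String × Int × Int
  | [], st => st
  | j :: js, (code_str, ptr_B_POS, B_odd_flag) =>
      let code_str := code_str ++
        ("    \"ldr     q" ++
         PySem.Int.toStr (PySem.List.pyGetD vector_id_array_B (PySem.List.pyGetD vector_scroll_B j 0) 0) ++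
         ", [x" ++ PySem.Int.toStr (PySem.List.pyGetD register_scroll_B B_odd_flag 0) ++
         ", #" ++ PySem.Int.toStr (ptr_B_POS * 16) ++ "]             \\n\"\n")
      if ptr_B_POS = COLS - 1 then
        pvALoop vector_id_array_B vector_scroll_B register_scroll_B COLS js
          (code_str ++
            ("    \"add     x" ++ PySem.Int.toStr (PySem.List.pyGetD register_scroll_B B_odd_flag 0) ++
             ", x" ++ PySem.Int.toStr (PySem.List.pyGetD register_scroll_B B_odd_flag 0) ++
             ", x8              \\n\"\n"),
           0, pvXor1 B_odd_flag)
      else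
        pvALoop vector_id_array_B vector_scroll_B register_scroll_B COLS js
          (code_str, ptr_B_POS + 1, B_odd_flag)

def micro_kernel_block_b_extra (is_last_k : Bool) (vector_id_array_B : List Int) (VEC_REG_B_LEN : Int) (vector_scroll_B : List Int) (register_scroll_B : List Int) (B_odd_flag : Int) (LINES : Int) (COLS : Int) (REG_BLOCK_TRANS_FLAG : Bool) : String :=
  let code_str := ""
  if REG_BLOCK_TRANS_FLAG && is_last_k && !(COLS == VEC_REG_B_LEN) then
    let vector_scroll_B := PySem.List.pyRange 0 VEC_REG_B_LEN 1
    (pvALoop vector_id_array_B vector_scroll_B register_scroll_B COLS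
        (PySem.List.pyRange 0 VEC_REG_B_LEN 1) (code_str, 0, B_odd_flag)).1
  else code_str

-- ===== PORT B =====
-- one loop iteration of B: everything is computed directly from j
-- (the Python `B_odd_flag ^ ((j // COLS) % 2)` xors with 0 or 1: keep the flag or flip its low bit)
def pvBEntry (vector_id_array_B register_scroll_B : List Int) (B_odd_flag COLS : Int) (j : Int) : String :=
  let off := if 0 < COLS then PySem.Int.mod j COLS else j
  let flag := if 0 < COLS then
      (if PySem.Int.mod (PySem.Int.floordiv j COLS) 2 = 1 then pvXor1 B_odd_flag else B_odd_flag)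
    else B_odd_flag
  let reg := PySem.List.pyGetD register_scroll_B flag 0
  let s := "    \"ldr     q" ++ PySem.Int.toStr (PySem.List.pyGetD vector_id_array_B j 0) ++
           ", [x" ++ PySem.Int.toStr reg ++ ", #" ++ PySem.Int.toStr (off * 16) ++
           "]             \\n\"\n"
  if 0 < COLS ∧ off = COLS - 1 then
    s ++ ("    \"add     x" ++ PySem.Int.toStr reg ++ ", x" ++ PySem.Int.toStr reg ++
          ", x8              \\n\"\n")
  else s

def micro_kernel_block_b_extra_alt (is_last_k : Bool) (vector_id_array_B : List Int) (VEC_REG_B_LEN : Int) (vector_scroll_B : List Int) (register_scroll_B : List Int) (B_odd_flag : Int) (LINES : Int) (COLS : Int) (REG_BLOCK_TRANS_FLAG : Bool) : String :=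
  if REG_BLOCK_TRANS_FLAG && is_last_k && !(COLS == VEC_REG_B_LEN) then
    PySem.Str.join "" ((PySem.List.pyRange 0 VEC_REG_B_LEN 1).map
      (pvBEntry vector_id_array_B register_scroll_B B_odd_flag COLS))
  else ""

-- ===== PRECONDITION & SPEC =====
-- Pre_ excludes exactly the inputs on which Python A raises IndexError: when the emitting
-- branch runs it indexes vector_id_array_B at every j < VEC_REG_B_LEN and register_scroll_B
-- at B_odd_flag (and, once the pointer has wrapped at least once, at B_odd_flag ^ 1).
def Pre_micro_kernel_block_b_extra (is_last_k : Bool) (vector_id_array_B : List Int) (VEC_REG_B_LEN : Int) (vector_scroll_B : List Int) (register_scroll_B : List Int) (B_odd_flag : Int) (LINES : Int) (COLS : Int) (REG_BLOCK_TRANS_FLAG : Bool) : Prop :=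
  (REG_BLOCK_TRANS_FLAG = true ∧ is_last_k = true ∧ COLS ≠ VEC_REG_B_LEN ∧ 0 < VEC_REG_B_LEN) →
    (VEC_REG_B_LEN ≤ (vector_id_array_B.length : Int) ∧
     PySem.Raise.InRange register_scroll_B.length B_odd_flag ∧
     (0 < COLS ∧ COLS < VEC_REG_B_LEN →
        PySem.Raise.InRange register_scroll_B.length (pvXor1 B_odd_flag)))
instance (is_last_k : Bool) (vector_id_array_B : List Int) (VEC_REG_B_LEN : Int) (vector_scroll_B : List Int) (register_scroll_B : List Int) (B_odd_flag : Int) (LINES : Int) (COLS : Int) (REG_BLOCK_TRANS_FLAG : Bool) : Decidable (Pre_micro_kernel_block_b_extra is_last_k vector_id_array_B VEC_REG_B_LEN vector_scroll_B register_scroll_B B_odd_flag LINES COLS REG_BLOCK_TRANS_FLAG) := by unfold Pre_micro_kernel_block_b_extra; infer_instance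

def pvWitness_micro_kernel_block_b_extra : Bool × List Int × Int × List Int × List Int × Int × Int × Int × Bool :=
  (true, [0, 1, 2, 3], 4, [], [10, 11], 0, 7, 2, true)

def Spec_micro_kernel_block_b_extra (is_last_k : Bool) (vector_id_array_B : List Int) (VEC_REG_B_LEN : Int) (vector_scroll_B : List Int) (register_scroll_B : List Int) (B_odd_flag : Int) (LINES : Int) (COLS : Int) (REG_BLOCK_TRANS_FLAG : Bool) (out : String) : Prop := out = micro_kernel_block_b_extra_alt is_last_k vector_id_array_B VEC_REG_B_LEN vector_scroll_B register_scroll_B B_odd_flag LINES COLS REG_BLOCK_TRANS_FLAG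
instance (is_last_k : Bool) (vector_id_array_B : List Int) (VEC_REG_B_LEN : Int) (vector_scroll_B : List Int) (register_scroll_B : List Int) (B_odd_flag : Int) (LINES : Int) (COLS : Int) (REG_BLOCK_TRANS_FLAG : Bool) (out : String) : Decidable (Spec_micro_kernel_block_b_extra is_last_k vector_id_array_B VEC_REG_B_LEN vector_scroll_B register_scroll_B B_odd_flag LINES COLS REG_BLOCK_TRANS_FLAG out) := by unfold Spec_micro_kernel_block_b_extra; infer_instance

-- ===== CLAIM (what is proved, stated in full; the proofs are below) =====
def Claim_equal_micro_kernel_block_b_extra : Prop := ∀ (is_last_k : Bool) (vector_id_array_B : List Int) (VEC_REG_B_LEN : Int) (vector_scroll_B : List Int) (register_scroll_B : List Int) (B_odd_flag : Int) (LINES : Int) (COLS : Int) (REG_BLOCK_TRANS_FLAG : Bool), Dom_micro_kernel_block_b_extra is_last_k vector_id_array_B VEC_REG_B_LEN vector_scroll_B register_scroll_B B_odd_flag LINES COLS REG_BLOCK_TRANS_FLAG → Pre_micro_kernel_block_b_extra is_last_k vector_id_array_B VEC_REG_B_LEN vector_scroll_B register_scroll_B B_odd_flag LINES COLS REG_BLOCK_TRANS_FLAG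 → Spec_micro_kernel_block_b_extra is_last_k vector_id_array_B VEC_REG_B_LEN vector_scroll_B register_scroll_B B_odd_flag LINES COLS REG_BLOCK_TRANS_FLAG (micro_kernel_block_b_extra is_last_k vector_id_array_B VEC_REG_B_LEN vector_scroll_B register_scroll_B B_odd_flag LINES COLS REG_BLOCK_TRANS_FLAG)

-- ===== LEMMAS AND PROOFS =====

theorem pvWitness_ok :
    Dom_micro_kernel_block_b_extra (pvWitness_micro_kernel_block_b_extra.1) (pvWitness_micro_kernel_block_b_extra.2.1) (pvWitness_micro_kernel_block_b_extra.2.2.1) (pvWitness_micro_kernel_block_b_extra.2.2.2.1) (pvWitness_micro_kernel_block_b_extra.2.2.2.2.1) (pvWitness_micro_kernel_block_b_extra.2.2.2.2.2.1) (pvWitness_micro_kernel_block_b_extra.2.2.2.2.2.2.1) (pvWitness_micro_kernel_block_b_extra.2.2.2.2.2.2.2.1) (pvWitness_micro_kernel_block_b_extra.2.2.2.2.2.2.2.2) ∧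
    Pre_micro_kernel_block_b_extra (pvWitness_micro_kernel_block_b_extra.1) (pvWitness_micro_kernel_block_b_extra.2.1) (pvWitness_micro_kernel_block_b_extra.2.2.1) (pvWitness_micro_kernel_block_b_extra.2.2.2.1) (pvWitness_micro_kernel_block_b_extra.2.2.2.2.1) (pvWitness_micro_kernel_block_b_extra.2.2.2.2.2.1) (pvWitness_micro_kernel_block_b_extra.2.2.2.2.2.2.1) (pvWitness_micro_kernel_block_b_extra.2.2.2.2.2.2.2.1) (pvWitness_micro_kernel_block_b_extra.2.2.2.2.2.2.2.2) := by
  decide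

theorem join_empty_nil : PySem.Str.join "" ([] : List String) = "" := by
  rw [← String.toList_inj]; simp [PySem.Str.join, PySem.Chars.join, List.intercalate]

theorem join_empty_cons (x : String) (l : List String) :
    PySem.Str.join "" (x :: l) = x ++ PySem.Str.join "" l := by
  rw [← String.toList_inj]
  simp [PySem.Str.join, PySem.Chars.join, List.intercalate]
  cases l <;> simp

theorem pvXor1_invol (n : Int) : pvXor1 (pvXor1 n) = n := by
  simp only [pvXor1, PySem.Int.mod_eq_emod_of_pos (show (0:Int) < 2 by omega)]
  split_ifs <;> omega

-- the closed-form register flag of B after a iterations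
def pvFlag (B0 COLS a : Int) : Int :=
  if PySem.Int.mod (PySem.Int.floordiv a COLS) 2 = 1 then pvXor1 B0 else B0

theorem pvStep_reset {COLS a : Int} (hC : 0 < COLS) (ha : 0 ≤ a) (hr : a % COLS = COLS - 1) :
    (a + 1) % COLS = 0 ∧ (a + 1) / COLS = a / COLS + 1 := by
  have hqr : COLS * (a / COLS) + a % COLS = a := Int.ediv_add_emod a COLS
  have h := (Int.ediv_emod_unique (a := a + 1) (b := COLS) (r := 0) (q := a / COLS + 1) hC).mpr
    ⟨by linarith, le_refl 0, hC⟩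
  exact ⟨h.2, h.1⟩

theorem pvStep_noreset {COLS a : Int} (hC : 0 < COLS) (ha : 0 ≤ a) (hr : a % COLS ≠ COLS - 1) :
    (a + 1) % COLS = a % COLS + 1 ∧ (a + 1) / COLS = a / COLS := by
  have hqr : COLS * (a / COLS) + a % COLS = a := Int.ediv_add_emod a COLS
  have h1 : 0 ≤ a % COLS := Int.emod_nonneg a (by omega)
  have h2 : a % COLS < COLS := Int.emod_lt_of_pos a hC
  have h := (Int.ediv_emod_unique (a := a + 1) (b := COLS) (r := a % COLS + 1) (q := a / COLS) hC).mpr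
    ⟨by linarith, by omega, by omega⟩
  exact ⟨h.2, h.1⟩

theorem pvFlag_succ_reset {B0 COLS a : Int} (hC : 0 < COLS) (ha : 0 ≤ a) (hr : a % COLS = COLS - 1) :
    pvFlag B0 COLS (a + 1) = pvXor1 (pvFlag B0 COLS a) := by
  have hd := (pvStep_reset hC ha hr).2
  simp only [pvFlag, PySem.Int.floordiv_eq_ediv_of_pos hC,
    PySem.Int.mod_eq_emod_of_pos (show (0:Int) < 2 by omega), hd]
  have h1 : 0 ≤ a / COLS % 2 := Int.emod_nonneg _ (by omega)
  have h2 : a / COLS % 2 < 2 := Int.emod_lt_of_pos _ (by omega)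
  by_cases hp : a / COLS % 2 = 1
  · have : (a / COLS + 1) % 2 = 0 := by omega
    simp [hp, this, pvXor1_invol]
  · have : (a / COLS + 1) % 2 = 1 := by omega
    simp [hp, this]

theorem pvFlag_succ_noreset {B0 COLS a : Int} (hC : 0 < COLS) (ha : 0 ≤ a) (hr : a % COLS ≠ COLS - 1) :
    pvFlag B0 COLS (a + 1) = pvFlag B0 COLS a := by
  have hd := (pvStep_noreset hC ha hr).2
  simp only [pvFlag, PySem.Int.floordiv_eq_ediv_of_pos hC, hd]

-- main invariant, COLS > 0: after a iterations the A-state is (code, a % COLS, pvFlag B0 COLS a)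
theorem pvLoop_pos (vid scr rs : List Int) (B0 COLS : Int) (hC : 0 < COLS) :
    ∀ (n : Nat) (a : Int), 0 ≤ a →
      (∀ j : Int, a ≤ j → j < a + n → PySem.List.pyGetD scr j 0 = j) →
      ∀ code : String,
      (pvALoop vid scr rs COLS (PySem.List.pyRange a (a + n) 1)
          (code, PySem.Int.mod a COLS, pvFlag B0 COLS a)).1
      = code ++ PySem.Str.join "" ((PySem.List.pyRange a (a + n) 1).map (pvBEntry vid rs B0 COLS)) := by
  intro n
  induction n with
  | zero =>
      intro a ha _ code
      rw [show a + (0:Nat) = a by omega, PySem.List.pyRange_one_eq_nil (le_refl a)]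
      simp [pvALoop, join_empty_nil]
  | succ n ih =>
      intro a ha hscr code
      have hab : a < a + (n + 1 : Nat) := by push_cast; omega
      rw [PySem.List.pyRange_one_cons hab]
      have hsa : PySem.List.pyGetD scr a 0 = a := hscr a (le_refl a) hab
      have hmod : PySem.Int.mod a COLS = a % COLS := PySem.Int.mod_eq_emod_of_pos hC
      have hEntry : pvBEntry vid rs B0 COLS a
          = (("    \"ldr     q" ++ PySem.Int.toStr (PySem.List.pyGetD vid a 0) ++
              ", [x" ++ PySem.Int.toStr (PySem.List.pyGetD rs (pvFlag B0 COLS a) 0) ++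
              ", #" ++ PySem.Int.toStr (a % COLS * 16) ++ "]             \\n\"\n") ++
             (if a % COLS = COLS - 1 then
                ("    \"add     x" ++ PySem.Int.toStr (PySem.List.pyGetD rs (pvFlag B0 COLS a) 0) ++
                 ", x" ++ PySem.Int.toStr (PySem.List.pyGetD rs (pvFlag B0 COLS a) 0) ++
                 ", x8              \\n\"\n")
              else "")) := by
        simp only [pvBEntry, pvFlag, hC, if_true, hmod]
        by_cases hr : a % COLS = COLS - 1 <;> simp [hr, hC]
      have htail : a + (n + 1 : Nat) = (a + 1) + (n : Nat) := by push_cast; omega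
      rw [htail] at *
      have ihs := ih (a + 1) (by omega) (fun j h1 h2 => hscr j (by omega) (by omega))
      by_cases hr : a % COLS = COLS - 1
      · have hm1 : PySem.Int.mod (a + 1) COLS = 0 := by
          rw [PySem.Int.mod_eq_emod_of_pos hC]; exact (pvStep_reset hC ha hr).1
        have hf1 : pvFlag B0 COLS (a + 1) = pvXor1 (pvFlag B0 COLS a) :=
          pvFlag_succ_reset hC ha hr
        simp only [hm1, hf1] at ihs
        simp only [pvALoop, hmod, hsa]
        rw [if_pos hr, ihs, List.map_cons, join_empty_cons, hEntry, if_pos hr]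
        simp [String.append_assoc]
      · have hm1 : PySem.Int.mod (a + 1) COLS = a % COLS + 1 := by
          rw [PySem.Int.mod_eq_emod_of_pos hC]; exact (pvStep_noreset hC ha hr).1
        have hf1 : pvFlag B0 COLS (a + 1) = pvFlag B0 COLS a :=
          pvFlag_succ_noreset hC ha hr
        simp only [hm1, hf1] at ihs
        simp only [pvALoop, hmod, hsa]
        rw [if_neg hr, ihs, List.map_cons, join_empty_cons, hEntry, if_neg hr]
        simp [String.append_assoc]

-- main invariant, COLS ≤ 0: the pointer never resets, the flag never toggles
theorem pvLoop_nonpos (vid scr rs : List Int) (B0 COLS : Int) (hC : COLS ≤ 0) :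
    ∀ (n : Nat) (a : Int), 0 ≤ a →
      (∀ j : Int, a ≤ j → j < a + n → PySem.List.pyGetD scr j 0 = j) →
      ∀ code : String,
      (pvALoop vid scr rs COLS (PySem.List.pyRange a (a + n) 1) (code, a, B0)).1
      = code ++ PySem.Str.join "" ((PySem.List.pyRange a (a + n) 1).map (pvBEntry vid rs B0 COLS)) := by
  intro n
  induction n with
  | zero =>
      intro a ha _ code
      rw [show a + (0:Nat) = a by omega, PySem.List.pyRange_one_eq_nil (le_refl a)]
      simp [pvALoop, join_empty_nil]
  | succ n ih =>
      intro a ha hscr code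
      have hab : a < a + (n + 1 : Nat) := by push_cast; omega
      rw [PySem.List.pyRange_one_cons hab]
      have hsa : PySem.List.pyGetD scr a 0 = a := hscr a (le_refl a) hab
      have hr : ¬ (a = COLS - 1) := by omega
      have hCn : ¬ (0 < COLS) := by omega
      simp only [pvALoop, hr, if_false, join_empty_cons, List.map_cons]
      have htail : a + (n + 1 : Nat) = (a + 1) + (n : Nat) := by push_cast; omega
      rw [htail] at *
      rw [ih (a + 1) (by omega) (fun j h1 h2 => hscr j (by omega) (by omega)) _]
      have hEntry : pvBEntry vid rs B0 COLS a
          = ("    \"ldr     q" ++ PySem.Int.toStr (PySem.List.pyGetD vid a 0) ++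
             ", [x" ++ PySem.Int.toStr (PySem.List.pyGetD rs B0 0) ++
             ", #" ++ PySem.Int.toStr (a * 16) ++ "]             \\n\"\n") := by
        simp [pvBEntry, hCn]
      rw [hEntry]
      simp [hsa, String.append_assoc]

theorem pvScrId (N : Int) :
    ∀ j : Int, 0 ≤ j → j < N → PySem.List.pyGetD (PySem.List.pyRange 0 N 1) j 0 = j := by
  intro j h1 h2
  have := PySem.List.pyGetD_map_pyRange_of_nonneg (fun x => x) N j 0 h1 h2
  simpa using this

-- ===== VERDICT (by name: the statement is the Claim_ definition above) =====
theorem micro_kernel_block_b_extra_spec : Claim_equal_micro_kernel_block_b_extra := by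
  intro is_last_k vid VEC vscr rs B0 LINES COLS RTF _ _
  unfold Spec_micro_kernel_block_b_extra micro_kernel_block_b_extra micro_kernel_block_b_extra_alt
  by_cases hg : (RTF && is_last_k && !(COLS == VEC)) = true
  · simp only [hg, if_true]
    by_cases hv : VEC ≤ 0
    · rw [PySem.List.pyRange_one_eq_nil hv]
      simp [pvALoop, join_empty_nil]
    · push_neg at hv
      by_cases hC : 0 < COLS
      · have hloop := pvLoop_pos vid (PySem.List.pyRange 0 VEC 1) rs B0 COLS hC VEC.toNat 0
          (le_refl 0) (fun j h1 h2 => pvScrId VEC j h1 (by omega)) ""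
        rw [show (0:Int) + (VEC.toNat : Int) = VEC by omega] at hloop
        rw [show PySem.Int.mod 0 COLS = 0 by
              rw [PySem.Int.mod_eq_emod_of_pos hC]; simp,
            show pvFlag B0 COLS 0 = B0 by
              simp [pvFlag, PySem.Int.floordiv_eq_ediv_of_pos hC,
                PySem.Int.mod_eq_emod_of_pos (show (0:Int) < 2 by omega)],
            String.empty_append] at hloop
        exact hloop
      · have hC' : COLS ≤ 0 := by omega
        have hloop := pvLoop_nonpos vid (PySem.List.pyRange 0 VEC 1) rs B0 COLS hC' VEC.toNat 0
          (le_refl 0) (fun j h1 h2 => pvScrId VEC j h1 (by omega)) ""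
        rw [show (0:Int) + (VEC.toNat : Int) = VEC by omega, String.empty_append] at hloop
        exact hloop
  · simp [hg]
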